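-- pv_equiv track=rewrite | github.com/dh7hong/algorithms-level-facebook | 171_100-mil.py | solution
-- ===== SOURCE A (Python) =====
-- def solution(e, starts):
--     # Step 1: Count divisors for each number
--     div_count = [0] * (e + 1)
--     for i in range(1, e + 1):
--         for j in range(i, e + 1, i):
--             div_count[j] += 1
--
--     # Step 2: Precompute best number from i to e
--     best = [0] * (e + 2)
--     best[e] = e
--
--     for i in range(e - 1, 0, -1):
--         if div_count[i] >= div_count[best[i + 1]]:
--             best[i] = i
--         else:
--             best[i] = best[i + 1]
--
--     # Step 3: Answer queries
--     return [best[s] for s in starts]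
-- ===== SOURCE B (Python) =====
-- def solution(e, starts):
--     # Step 1: divisor-pair sieve: each j gets 2 for every divisor pair (d, j//d)
--     # with d*d < j, and 1 when j is the square d*d.
--     div_count = [0] * (e + 1)
--     d = 1
--     while d * d <= e:
--         for j in range(d * d, e + 1, d):
--             div_count[j] += 1 if j == d * d else 2
--         d += 1
--
--     # Step 2: Precompute best number from i to e
--     best = [0] * (e + 2)
--     best[e] = e
--
--     for i in range(e - 1, 0, -1):
--         if div_count[i] >= div_count[best[i + 1]]:
--             best[i] = i
--         else:
--             best[i] = best[i + 1]
--
--     # Step 3: Answer queries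
--     return [best[s] for s in starts]
-- ===== Notes on version B (the rewrite author's own statement) =====
-- stated objective: alternative
-- what changed: Step 1's harmonic sieve (add 1 to div_count[j] for every multiple j of every i in 1..e) is replaced by a divisor-pair sieve: d runs only up to sqrt(e) and every multiple j of d starting at d*d gets 2 (the pair d and j//d), or 1 when j == d*d; Steps 2-3 (suffix best with >= tie-break, query lookup) are unchanged.
import Mathlib
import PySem

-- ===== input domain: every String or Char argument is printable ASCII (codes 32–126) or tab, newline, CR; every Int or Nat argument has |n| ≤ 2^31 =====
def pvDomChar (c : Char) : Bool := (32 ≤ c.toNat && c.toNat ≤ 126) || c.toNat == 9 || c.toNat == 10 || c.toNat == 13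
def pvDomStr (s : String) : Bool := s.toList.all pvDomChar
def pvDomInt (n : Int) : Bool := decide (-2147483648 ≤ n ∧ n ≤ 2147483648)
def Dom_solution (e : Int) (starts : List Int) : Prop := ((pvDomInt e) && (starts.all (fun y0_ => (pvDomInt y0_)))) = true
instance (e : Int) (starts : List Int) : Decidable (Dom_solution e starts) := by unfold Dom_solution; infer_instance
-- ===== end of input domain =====

-- B replaces A's harmonic all-divisors sieve (1 per multiple of every i in 1..e) by a divisor-PAIR
-- sieve: d runs only to sqrt(e), each multiple j of d from d*d on gets 2 (pair d, j//d), or 1 when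
-- j == d*d (objective: alternative; speed unverified in a timing run).
-- Steps 2–3 of Source A and Source B are byte-identical and are ported once as `bestAnswer`, used by both ports.

-- ===== PORT A =====
-- Step 1 of Source A: harmonic sieve, div_count[j] += 1 for every multiple j of every i in 1..e.
def sieveCounts (e : Int) : List Int :=
  (PySem.List.pyRange 1 (e + 1) 1).foldl
    (fun dc i =>
      (PySem.List.pyRange i (e + 1) i).foldl
        (fun dc j => PySem.List.pySetD dc j (PySem.List.pyGetD dc j 0 + 1)) dc)
    (List.replicate (e + 1).toNat 0)

-- Steps 2–3 (identical in Source A and Source B): suffix best with >=-tie-break, then answer queries.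
-- pySetD/pyGetD carry Python's negative-index wraparound (best[e] = e also at e = -1);
-- out-of-range reads (an IndexError in Python) are excluded by Pre_solution below.
def bestAnswer (e : Int) (dc : List Int) (starts : List Int) : List Int :=
  let best0 := PySem.List.pySetD (List.replicate (e + 2).toNat (0 : Int)) e e
  let best :=
    (PySem.List.pyRange (e - 1) 0 (-1)).foldl
      (fun b i =>
        if PySem.List.pyGetD dc i 0 ≥ PySem.List.pyGetD dc (PySem.List.pyGetD b (i + 1) 0) 0
        then PySem.List.pySetD b i i
        else PySem.List.pySetD b i (PySem.List.pyGetD b (i + 1) 0))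
      best0
  starts.map fun s => PySem.List.pyGetD best s 0

def solution (e : Int) (starts : List Int) : List Int :=
  bestAnswer e (sieveCounts e) starts

-- ===== PORT B =====
-- Source B's `while d * d <= e` loop: a divisor-pair sieve — every multiple j of d from d*d on
-- receives 2 (for the pair d, j//d), or 1 when j == d*d.
def pairSieve (e d : Int) (dc : List Int) : List Int :=
  if d * d ≤ e then
    pairSieve e (d + 1)
      ((PySem.List.pyRange (d * d) (e + 1) d).foldl
        (fun dc j =>
          PySem.List.pySetD dc j (PySem.List.pyGetD dc j 0 + (if j = d * d then 1 else 2))) dc)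
  else dc
termination_by (e + 1 - d).toNat
decreasing_by
  have h1 : 2 * d ≤ e + 1 := by nlinarith [mul_self_nonneg (d - 1)]
  have h2 : (0:Int) ≤ e := by nlinarith [mul_self_nonneg d]
  omega

-- Step 1 of Source B: the counts array after the whole while loop.
def pairCounts (e : Int) : List Int := pairSieve e 1 (List.replicate (e + 1).toNat 0)

def solution_alt (e : Int) (starts : List Int) : List Int :=
  bestAnswer e (pairCounts e) starts

-- ===== PRECONDITION & SPEC =====
-- Exactly the inputs on which the Python A returns: e ≥ -1 (for e ≤ -2, `best[e] = e` on the
-- empty list `best` raises IndexError) and every query s a valid (possibly negative) index into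
-- `best` of length e + 2 (otherwise `best[s]` raises IndexError).
def Pre_solution (e : Int) (starts : List Int) : Prop :=
  -1 ≤ e ∧ ∀ s ∈ starts, -(e + 2) ≤ s ∧ s < e + 2
instance (e : Int) (starts : List Int) : Decidable (Pre_solution e starts) := by
  unfold Pre_solution; infer_instance

def pvWitness_solution : Int × List Int := (5, [1, 3, 5])

def Spec_solution (e : Int) (starts : List Int) (out : List Int) : Prop := out = solution_alt e starts
instance (e : Int) (starts : List Int) (out : List Int) : Decidable (Spec_solution e starts out) := by
  unfold Spec_solution; infer_instance

-- ===== CLAIM (what is proved, stated in full; the proofs are below) =====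
def Claim_equal_solution : Prop := ∀ (e : Int) (starts : List Int), Dom_solution e starts → Pre_solution e starts → Spec_solution e starts (solution e starts)

-- ===== LEMMAS AND PROOFS =====

-- The increment loop body of A's sieve preserves the list length.
theorem foldIncr_length (L : List Int) (dc : List Int) :
    (L.foldl (fun dc j => PySem.List.pySetD dc j (PySem.List.pyGetD dc j 0 + 1)) dc).length
      = dc.length := by
  induction L generalizing dc with
  | nil => rfl
  | cons j L ih => simp [List.foldl_cons, ih, PySem.List.length_pySetD]

-- Folding `dc[j] += 1` over a list of in-range indices adds, at index k, the number of occurrences of k.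
theorem foldIncr_get (L : List Int) (dc : List Int) (k : Nat) (hk : k < dc.length)
    (hL : ∀ j ∈ L, 0 ≤ j ∧ j < (dc.length : Int)) :
    PySem.List.pyGetD
        (L.foldl (fun dc j => PySem.List.pySetD dc j (PySem.List.pyGetD dc j 0 + 1)) dc)
        (k : Int) 0
      = PySem.List.pyGetD dc (k : Int) 0 + (L.count (k : Int) : Int) := by
  induction L generalizing dc with
  | nil => simp
  | cons j L ih =>
    obtain ⟨hj0, hjlt⟩ := hL j (List.mem_cons_self ..)
    have hjlen : j.toNat < dc.length := by omega
    have hjn : j = ((j.toNat : Nat) : Int) := (Int.toNat_of_nonneg hj0).symm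
    rw [List.foldl_cons]
    rw [ih _ (by rw [PySem.List.length_pySetD]; exact hk)
        (by intro x hx; rw [PySem.List.length_pySetD]; exact hL x (List.mem_cons_of_mem _ hx))]
    rw [List.count_cons]
    conv_lhs => rw [hjn]
    rw [PySem.List.pyGetD_pySetD_natCast dc j.toNat k _ 0 hjlen]
    by_cases hkj : k = j.toNat
    · rw [if_pos hkj]
      have : j = (k : Int) := by omega
      rw [this]
      simp
      ring
    · rw [if_neg hkj]
      have : ¬ (j == (k : Int)) := by simp; omega
      simp [this]

-- A's outer sieve loop, read at a fixed index k.
theorem foldOuter_get (e : Int) (L : List Int) (dc : List Int) (k : Nat)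
    (hlen : (dc.length : Int) = e + 1) (hk : k < dc.length) (hL : ∀ i ∈ L, 1 ≤ i) :
    PySem.List.pyGetD
        (L.foldl
          (fun dc i =>
            (PySem.List.pyRange i (e + 1) i).foldl
              (fun dc j => PySem.List.pySetD dc j (PySem.List.pyGetD dc j 0 + 1)) dc)
          dc)
        (k : Int) 0
      = PySem.List.pyGetD dc (k : Int) 0
        + ((L.map (fun i => ((PySem.List.pyRange i (e + 1) i).count (k : Int) : Int))).sum) := by
  induction L generalizing dc with
  | nil => simp
  | cons i L ih =>
    have hi := hL i (List.mem_cons_self ..)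
    have hmem : ∀ j ∈ PySem.List.pyRange i (e + 1) i, 0 ≤ j ∧ j < (dc.length : Int) := by
      intro j hj
      rw [PySem.List.mem_pyRange_iff_of_pos (by omega)] at hj
      constructor <;> omega
    rw [List.foldl_cons,
      ih _ (by rw [foldIncr_length]; exact hlen) (by rw [foldIncr_length]; exact hk)
        (fun x hx => hL x (List.mem_cons_of_mem _ hx)),
      foldIncr_get _ _ _ hk hmem]
    simp [List.map_cons, List.sum_cons]
    ring

-- How often k occurs among the multiples i, 2i, … of a positive step i below b.
theorem count_pyRange_mul (i b x : Int) (hi : 1 ≤ i) :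
    ((PySem.List.pyRange i b i).count x : Int) = if i ≤ x ∧ x < b ∧ i ∣ x then 1 else 0 := by
  have hnd : (PySem.List.pyRange i b i).Nodup := by
    rw [PySem.List.pyRange_of_pos _ _ (by omega)]
    refine List.Nodup.map ?_ List.nodup_range
    intro a b' hab
    dsimp at hab
    have h2 : i * (a : Int) = i * (b' : Int) := by linarith
    have := mul_left_cancel₀ (by omega : i ≠ 0) h2
    exact_mod_cast this
  by_cases hx : x ∈ PySem.List.pyRange i b i
  · obtain ⟨h1, h2, h3⟩ := (PySem.List.mem_pyRange_iff_of_pos (by omega) x).mp hx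
    have hdvd : i ∣ x := by
      have hx2 : x = (x - i) + i := by ring
      rw [hx2]
      exact dvd_add h3 dvd_rfl
    rw [List.count_eq_one_of_mem hnd hx, if_pos ⟨h1, h2, hdvd⟩]
    norm_num
  · have hc : ¬ (i ≤ x ∧ x < b ∧ i ∣ x) := by
      rintro ⟨h1, h2, h3⟩
      exact hx ((PySem.List.mem_pyRange_iff_of_pos (by omega) x).mpr ⟨h1, h2, dvd_sub h3 dvd_rfl⟩)
    rw [List.count_eq_zero_of_not_mem hx, if_neg hc]
    norm_num

-- Entry k of A's sieve array is the 0/1 divisor sum of k over 1..k.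
theorem sieve_get (e : Int) (k : Nat) (hk : k < (e + 1).toNat) :
    PySem.List.pyGetD (sieveCounts e) (k : Int) 0
      = ((PySem.List.pyRange 1 ((k : Int) + 1) 1).map
          (fun d => if d ∣ (k : Int) then (1 : Int) else 0)).sum := by
  have hN : (((List.replicate (e + 1).toNat (0:Int)).length : Int)) = e + 1 := by
    simp [List.length_replicate]; omega
  unfold sieveCounts
  rw [foldOuter_get e _ _ k hN (by simpa using hk)
    (by intro i hi; exact ((PySem.List.mem_pyRange_one).mp hi).1)]
  rw [PySem.List.pyGetD_natCast, List.getD_replicate _ (by simpa using hk), zero_add]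
  rw [List.map_congr_left (fun i hi => by
    exact count_pyRange_mul i (e+1) (k : Int) ((PySem.List.mem_pyRange_one).mp hi).1)]
  rw [PySem.List.pyRange_one_append 1 ((k : Int) + 1) (e + 1) (by omega) (by omega),
    List.map_append, List.sum_append]
  have h2 : ((PySem.List.pyRange ((k : Int) + 1) (e + 1) 1).map
      (fun i => if i ≤ (k : Int) ∧ (k : Int) < e + 1 ∧ i ∣ (k : Int) then (1:Int) else 0)).sum = 0 := by
    apply List.sum_eq_zero
    intro x hx
    obtain ⟨i, hi, rfl⟩ := List.mem_map.mp hx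
    have := (PySem.List.mem_pyRange_one).mp hi
    rw [if_neg (by rintro ⟨ha, _, _⟩; omega)]
  rw [h2, add_zero]
  congr 1
  apply List.map_congr_left
  intro i hi
  have hm := (PySem.List.mem_pyRange_one).mp hi
  by_cases hd : i ∣ (k : Int)
  · rw [if_pos ⟨by omega, by omega, hd⟩, if_pos hd]
  · rw [if_neg (by tauto), if_neg hd]
-- Folding `dc[j] += g j` over a list of in-range indices: entry k grows by (count of k) * g k.
theorem foldAdd_length (g : Int → Int) (L : List Int) (dc : List Int) :
    (L.foldl (fun dc j => PySem.List.pySetD dc j (PySem.List.pyGetD dc j 0 + g j)) dc).length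
      = dc.length := by
  induction L generalizing dc with
  | nil => rfl
  | cons j L ih => simp [List.foldl_cons, ih, PySem.List.length_pySetD]
theorem foldAdd_get (g : Int → Int) (L : List Int) (dc : List Int) (k : Nat) (hk : k < dc.length)
    (hL : ∀ j ∈ L, 0 ≤ j ∧ j < (dc.length : Int)) :
    PySem.List.pyGetD
        (L.foldl (fun dc j => PySem.List.pySetD dc j (PySem.List.pyGetD dc j 0 + g j)) dc)
        (k : Int) 0
      = PySem.List.pyGetD dc (k : Int) 0 + (L.count (k : Int) : Int) * g (k : Int) := by
  induction L generalizing dc with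
  | nil => simp
  | cons j L ih =>
    obtain ⟨hj0, hjlt⟩ := hL j (List.mem_cons_self ..)
    have hjlen : j.toNat < dc.length := by omega
    have hjn : j = ((j.toNat : Nat) : Int) := (Int.toNat_of_nonneg hj0).symm
    rw [List.foldl_cons]
    rw [ih _ (by rw [PySem.List.length_pySetD]; exact hk)
        (by intro x hx; rw [PySem.List.length_pySetD]; exact hL x (List.mem_cons_of_mem _ hx))]
    rw [List.count_cons]
    conv_lhs => rw [hjn]
    rw [PySem.List.pyGetD_pySetD_natCast dc j.toNat k _ 0 hjlen]
    by_cases hkj : k = j.toNat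
    · rw [if_pos hkj]
      have hjk : j = (k : Int) := by omega
      rw [hjk]
      simp
      ring
    · rw [if_neg hkj]
      have : ¬ (j == (k : Int)) := by simp; omega
      simp [this]
-- B's pair sieve preserves the list length.
theorem pairSieve_length (n : Nat) (e d : Int) (dc : List Int) (hn : (e + 1 - d).toNat = n) :
    (pairSieve e d dc).length = dc.length := by
  induction n generalizing d dc with
  | zero =>
    rw [pairSieve, if_neg (by
      intro hle
      have hd' : e + 1 ≤ d := by omega
      have h1 : 2 * d ≤ e + 1 := by nlinarith [mul_self_nonneg (d - 1)]
      have h2 : (0:Int) ≤ e := by nlinarith [mul_self_nonneg d]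
      omega)]
  | succ n ih =>
    rw [pairSieve]
    split_ifs with h
    · rw [ih (d + 1) _ (by omega), foldAdd_length]
    · rfl
-- How often k occurs among d*d, d*d+d, … below b (step d ≥ 1).
theorem count_pyRange_sq (i b x : Int) (hi : 1 ≤ i) :
    ((PySem.List.pyRange (i * i) b i).count x : Int)
      = if i * i ≤ x ∧ x < b ∧ i ∣ x then 1 else 0 := by
  have hnd : (PySem.List.pyRange (i * i) b i).Nodup := by
    rw [PySem.List.pyRange_of_pos _ _ (by omega)]
    refine List.Nodup.map ?_ List.nodup_range
    intro a b' hab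
    dsimp at hab
    have h2 : i * (a : Int) = i * (b' : Int) := by linarith
    have := mul_left_cancel₀ (by omega : i ≠ 0) h2
    exact_mod_cast this
  have hii : i ∣ i * i := dvd_mul_left i i
  by_cases hx : x ∈ PySem.List.pyRange (i * i) b i
  · obtain ⟨h1, h2, h3⟩ := (PySem.List.mem_pyRange_iff_of_pos (by omega) x).mp hx
    have hdvd : i ∣ x := by
      have hx2 : x = (x - i * i) + i * i := by ring
      rw [hx2]
      exact dvd_add h3 hii
    rw [List.count_eq_one_of_mem hnd hx, if_pos ⟨h1, h2, hdvd⟩]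
    norm_num
  · have hc : ¬ (i * i ≤ x ∧ x < b ∧ i ∣ x) := by
      rintro ⟨h1, h2, h3⟩
      exact hx ((PySem.List.mem_pyRange_iff_of_pos (by omega) x).mpr ⟨h1, h2, dvd_sub h3 hii⟩)
    rw [List.count_eq_zero_of_not_mem hx, if_neg hc]
    norm_num
-- B's while loop, read at a fixed index k, as a sum over d = start .. sqrt(e).
theorem pairSieve_get (n : Nat) (e : Int) (he : 0 ≤ e) (d : Int) (hd : 1 ≤ d)
    (hn : ((Nat.sqrt e.toNat : Int) + 1 - d).toNat = n) (dc : List Int)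
    (hlen : (dc.length : Int) = e + 1) (k : Nat) (hk : k < dc.length) :
    PySem.List.pyGetD (pairSieve e d dc) (k : Int) 0
      = PySem.List.pyGetD dc (k : Int) 0
        + ((PySem.List.pyRange d ((Nat.sqrt e.toNat : Int) + 1) 1).map
            (fun x => ((PySem.List.pyRange (x * x) (e + 1) x).count (k : Int) : Int)
              * (if (k : Int) = x * x then 1 else 2))).sum := by
  induction n generalizing d dc with
  | zero =>
    have hgt : (Nat.sqrt e.toNat : Int) + 1 ≤ d := by omega
    have hdn : ((d.toNat : Int)) = d := Int.toNat_of_nonneg (by omega)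
    have hstop : ¬ d * d ≤ e := by
      intro hle
      have h1 : d.toNat * d.toNat ≤ e.toNat := by
        have hc : ((d.toNat * d.toNat : Nat) : Int) ≤ ((e.toNat : Nat) : Int) := by
          push_cast
          rw [hdn, Int.toNat_of_nonneg he]
          exact hle
        exact_mod_cast hc
      have h2 : d.toNat ≤ Nat.sqrt e.toNat := Nat.le_sqrt'.mpr (by rwa [pow_two])
      omega
    rw [pairSieve, if_neg hstop, PySem.List.pyRange_one_eq_nil hgt]
    simp
  | succ n ih =>
    have hdn : ((d.toNat : Int)) = d := Int.toNat_of_nonneg (by omega)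
    have hdle : d ≤ (Nat.sqrt e.toNat : Int) := by omega
    have hgo : d * d ≤ e := by
      have h1 : d.toNat ≤ Nat.sqrt e.toNat := by omega
      have h2' := Nat.sqrt_le' e.toNat
      rw [pow_two] at h2'
      have h2 : d.toNat * d.toNat ≤ e.toNat := le_trans (Nat.mul_le_mul h1 h1) h2'
      have hc : ((d.toNat * d.toNat : Nat) : Int) ≤ ((e.toNat : Nat) : Int) := by exact_mod_cast h2
      rw [Int.toNat_of_nonneg he] at hc
      push_cast at hc
      rw [hdn] at hc
      exact hc
    have hmem : ∀ j ∈ PySem.List.pyRange (d * d) (e + 1) d, 0 ≤ j ∧ j < (dc.length : Int) := by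
      intro j hj
      obtain ⟨h1, h2, _⟩ := (PySem.List.mem_pyRange_iff_of_pos (by omega) j).mp hj
      have hdd : (0:Int) ≤ d * d := by positivity
      constructor <;> omega
    have hcons : PySem.List.pyRange d ((Nat.sqrt e.toNat : Int) + 1) 1
        = d :: PySem.List.pyRange (d + 1) ((Nat.sqrt e.toNat : Int) + 1) 1 :=
      PySem.List.pyRange_one_cons (by omega)
    rw [pairSieve, if_pos hgo,
      ih (d + 1) (by omega) (by omega) _ (by rw [foldAdd_length]; exact hlen)
        (by rw [foldAdd_length]; exact hk),
      foldAdd_get _ _ _ _ hk hmem, hcons]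
    simp only [List.map_cons, List.sum_cons]
    ring

-- The number of divisors of k as a count over 0..k-1 (shift by one).
theorem divisors_card_nbij (k : Nat) (hk : 1 ≤ k) :
    ((Finset.range k).filter (fun t => (t + 1) ∣ k)).card = (Nat.divisors k).card := by
  apply Finset.card_nbij (fun t => t + 1)
  · intro t ht
    simp only [Finset.coe_filter, Set.mem_setOf_eq, Finset.mem_range] at ht
    simp only [Nat.mem_divisors, Finset.mem_coe]
    exact ⟨ht.2, by omega⟩
  · intro a ha b hb hab
    simp only [] at hab
    omega
  · intro d hd
    simp only [Finset.mem_coe, Nat.mem_divisors] at hd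
    have hd1 : 1 ≤ d := Nat.pos_of_dvd_of_pos hd.1 (by omega)
    have hdk : d ≤ k := Nat.le_of_dvd (by omega) hd.1
    have hdkk : d < k ∨ d = k := by omega
    refine ⟨d - 1, ?_, by simp only []; omega⟩
    simp only [Finset.coe_filter, Set.mem_setOf_eq, Finset.mem_range]
    constructor
    · omega
    · have : d - 1 + 1 = d := by omega
      rw [this]; exact hd.1
-- Divisor pairing: 2 per divisor pair (d, k/d) with d*d < k (1 when k = d*d), for d up to any
-- m ≥ sqrt k, counts all divisors of k.
theorem pairing (k m : Nat) (hk : 1 ≤ k) (hm : Nat.sqrt k ≤ m) :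
    ∑ t ∈ Finset.range m,
        (if (t + 1) * (t + 1) ≤ k ∧ (t + 1) ∣ k then (if k = (t + 1) * (t + 1) then 1 else 2) else 0)
      = ∑ t ∈ Finset.range k, (if (t + 1) ∣ k then 1 else 0) := by
  have hk0 : k ≠ 0 := by omega
  -- RHS = number of divisors
  have hrhs : ∑ t ∈ Finset.range k, (if (t + 1) ∣ k then (1:Nat) else 0) = (Nat.divisors k).card := by
    rw [← Finset.card_filter]
    exact divisors_card_nbij k hk
  -- LHS over Ico 1 (m + 1)
  have hlhs : ∑ t ∈ Finset.range m,
      (if (t + 1) * (t + 1) ≤ k ∧ (t + 1) ∣ k then (if k = (t + 1) * (t + 1) then 1 else 2) else 0)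
      = ∑ d ∈ Finset.Ico 1 (m + 1),
          (if d * d ≤ k ∧ d ∣ k then (if k = d * d then 1 else 2) else 0) := by
    rw [Finset.sum_Ico_eq_sum_range]
    simp only [Nat.add_sub_cancel]
    exact Finset.sum_congr rfl (fun t _ => by rw [Nat.add_comm 1 t])
  rw [hlhs, hrhs]
  -- filter the Ico down to the small divisors S
  have hS : (Finset.Ico 1 (m + 1)).filter (fun d => d * d ≤ k ∧ d ∣ k)
      = (Nat.divisors k).filter (fun d => d * d ≤ k) := by
    ext d
    simp only [Finset.mem_filter, Finset.mem_Ico, Nat.mem_divisors]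
    constructor
    · rintro ⟨⟨h1, h2⟩, h3, h4⟩
      exact ⟨⟨h4, hk0⟩, h3⟩
    · rintro ⟨⟨h1, _⟩, h2⟩
      have hd1 : 1 ≤ d := Nat.pos_of_dvd_of_pos h1 (by omega)
      have : d ≤ Nat.sqrt k := Nat.le_sqrt'.mpr (by rwa [pow_two])
      exact ⟨⟨hd1, by omega⟩, h2, h1⟩
  rw [← Finset.sum_filter, hS]
  -- on S, "k = d*d" is "k / d = d"
  have hcongr : ∑ d ∈ (Nat.divisors k).filter (fun d => d * d ≤ k),
        (if k = d * d then (1:Nat) else 2)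
      = ∑ d ∈ (Nat.divisors k).filter (fun d => d * d ≤ k),
        (if k / d ≠ d then (2:Nat) else 1) := by
    apply Finset.sum_congr rfl
    intro d hd
    simp only [Finset.mem_filter, Nat.mem_divisors] at hd
    obtain ⟨⟨hdvd, _⟩, hsq⟩ := hd
    have hd0 : 0 < d := Nat.pos_of_dvd_of_pos hdvd (by omega)
    have hq : d * (k / d) = k := Nat.mul_div_cancel' hdvd
    by_cases hke : k = d * d
    · have : k / d = d := by
        apply Nat.eq_of_mul_eq_mul_left hd0
        omega
      rw [if_pos hke, if_neg (not_not.mpr this)]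
    · have : k / d ≠ d := by
        intro hc
        rw [hc] at hq
        omega
      rw [if_neg hke, if_pos this]
  rw [hcongr]
  set S := (Nat.divisors k).filter (fun d => d * d ≤ k) with hSdef
  set L := (Nat.divisors k).filter (fun d => ¬ d * d ≤ k) with hLdef
  have hsplit : S.card + L.card = (Nat.divisors k).card :=
    Finset.card_filter_add_card_filter_not (fun d => d * d ≤ k)
  -- the summand is 1 + indicator(k / d ≠ d)
  have hsum : ∑ d ∈ S, (if k / d ≠ d then (2:Nat) else 1)
      = S.card + (S.filter (fun d => k / d ≠ d)).card := by
    calc ∑ d ∈ S, (if k / d ≠ d then (2:Nat) else 1)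
        = ∑ d ∈ S, (1 + if k / d ≠ d then 1 else 0) :=
          Finset.sum_congr rfl (fun d _ => by split_ifs <;> rfl)
      _ = S.card + (S.filter (fun d => k / d ≠ d)).card := by
          rw [Finset.sum_add_distrib, Finset.sum_const, smul_eq_mul, mul_one, ← Finset.card_filter]
  have hbij : (S.filter (fun d => k / d ≠ d)).card = L.card := by
    apply Finset.card_nbij' (fun d => k / d) (fun d => k / d)
    · intro d hd
      replace hd : d ∈ Finset.filter (fun d => k / d ≠ d) S := hd
      show k / d ∈ L
      simp only [hSdef, hLdef, Finset.mem_filter, Nat.mem_divisors] at hd ⊢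
      obtain ⟨⟨⟨hdvd, _⟩, hsq⟩, hne⟩ := hd
      have hd0 : 0 < d := Nat.pos_of_dvd_of_pos hdvd (by omega)
      have hq : d * (k / d) = k := Nat.mul_div_cancel' hdvd
      have hlt : d < k / d := by
        by_contra hle
        push Not at hle
        have h1 : d * (k / d) ≤ d * d := Nat.mul_le_mul_left d hle
        have h2 : d * (k / d) = d * d := by omega
        exact hne (Nat.eq_of_mul_eq_mul_left hd0 h2)
      refine ⟨⟨Nat.div_dvd_of_dvd hdvd, hk0⟩, ?_⟩
      have h3 : d * (k / d) < (k / d) * (k / d) :=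
        Nat.mul_lt_mul_of_lt_of_le hlt (Nat.le_refl _) (by omega)
      omega
    · intro d hd
      replace hd : d ∈ L := hd
      show k / d ∈ Finset.filter (fun d => k / d ≠ d) S
      simp only [hSdef, hLdef, Finset.mem_filter, Nat.mem_divisors] at hd ⊢
      obtain ⟨⟨hdvd, _⟩, hnsq⟩ := hd
      have hd0 : 0 < d := Nat.pos_of_dvd_of_pos hdvd (by omega)
      have hq : d * (k / d) = k := Nat.mul_div_cancel' hdvd
      have hqd : k / d < d := by
        by_contra hge
        push Not at hge
        have h1 : d * d ≤ d * (k / d) := Nat.mul_le_mul_left d hge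
        omega
      have hkq : k / (k / d) = d := Nat.div_div_self hdvd hk0
      have hq0 : 0 < k / d := by
        rcases Nat.eq_zero_or_pos (k / d) with h | h
        · rw [h] at hq; omega
        · exact h
      refine ⟨⟨⟨Nat.div_dvd_of_dvd hdvd, hk0⟩, ?_⟩, ?_⟩
      · have h3 : (k / d) * (k / d) ≤ d * (k / d) :=
          Nat.mul_le_mul_right (k / d) (by omega)
        omega
      · intro hcontra
        rw [hkq] at hcontra
        omega
    · intro d hd
      replace hd : d ∈ Finset.filter (fun d => k / d ≠ d) S := hd
      simp only [hSdef, Finset.mem_filter, Nat.mem_divisors] at hd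
      exact Nat.div_div_self hd.1.1.1 hk0
    · intro d hd
      replace hd : d ∈ L := hd
      simp only [hLdef, Finset.mem_filter, Nat.mem_divisors] at hd
      exact Nat.div_div_self hd.1.1 hk0
  rw [hsum, hbij, hsplit]

-- A range-comprehension sum over 1..n as a Finset.range sum.
theorem pyRange_map_sum (n : Nat) (f : Int → Int) :
    ((PySem.List.pyRange 1 ((n : Int) + 1) 1).map f).sum = ∑ t ∈ Finset.range n, f (1 + (t : Int)) := by
  rw [PySem.List.pyRange_one]
  have h : ((n : Int) + 1 - 1).toNat = n := by omega
  rw [h, List.map_map]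
  rfl
-- Entry k of B's pair-sieve array.
theorem pair_get (e : Int) (k : Nat) (hk : k < (e + 1).toNat) :
    PySem.List.pyGetD (pairCounts e) (k : Int) 0
      = ((PySem.List.pyRange 1 ((Nat.sqrt e.toNat : Int) + 1) 1).map
          (fun x => if x * x ≤ (k : Int) ∧ x ∣ (k : Int)
            then (if (k : Int) = x * x then (1 : Int) else 2) else 0)).sum := by
  have he : 0 ≤ e := by omega
  unfold pairCounts
  rw [pairSieve_get (((Nat.sqrt e.toNat : Int) + 1 - 1).toNat) e he 1 le_rfl rfl _
      (by simp only [List.length_replicate]; omega) k (by simpa using hk)]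
  rw [PySem.List.pyGetD_natCast, List.getD_replicate _ (by simpa using hk), zero_add]
  congr 1
  apply List.map_congr_left
  intro x hx
  have hx1 : 1 ≤ x := ((PySem.List.mem_pyRange_one).mp hx).1
  rw [count_pyRange_sq x (e + 1) (k : Int) hx1]
  by_cases hc : x * x ≤ (k : Int) ∧ x ∣ (k : Int)
  · have hke : (k : Int) < e + 1 := by omega
    rw [if_pos ⟨hc.1, hke, hc.2⟩, if_pos hc, one_mul]
  · rw [if_neg (by tauto), if_neg hc, zero_mul]

-- B's pair-sieve sum equals A's 0/1 divisor sum.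
theorem pair_eq_sum (e : Int) (k : Nat) (hk1 : 1 ≤ k) (hke : (k : Int) ≤ e) :
    ((PySem.List.pyRange 1 ((Nat.sqrt e.toNat : Int) + 1) 1).map
        (fun x => if x * x ≤ (k : Int) ∧ x ∣ (k : Int)
          then (if (k : Int) = x * x then (1 : Int) else 2) else 0)).sum
      = ((PySem.List.pyRange 1 ((k : Int) + 1) 1).map
          (fun d => if d ∣ (k : Int) then (1 : Int) else 0)).sum := by
  rw [pyRange_map_sum (Nat.sqrt e.toNat) _, pyRange_map_sum k _]
  have hterm : ∀ t : Nat,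
      (if (1 + (t : Int)) * (1 + (t : Int)) ≤ (k : Int) ∧ (1 + (t : Int)) ∣ (k : Int)
        then (if (k : Int) = (1 + (t : Int)) * (1 + (t : Int)) then (1 : Int) else 2) else 0)
      = ((if (t + 1) * (t + 1) ≤ k ∧ (t + 1) ∣ k
          then (if k = (t + 1) * (t + 1) then 1 else 2) else 0 : Nat) : Int) := by
    intro t
    have hcast : (1 + (t : Int)) = ((t + 1 : Nat) : Int) := by push_cast; ring
    have hle : (1 + (t : Int)) * (1 + (t : Int)) ≤ (k : Int) ↔ (t + 1) * (t + 1) ≤ k := by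
      rw [hcast]
      constructor <;> intro h <;> exact_mod_cast h
    have hdv : (1 + (t : Int)) ∣ (k : Int) ↔ (t + 1) ∣ k := by
      rw [hcast]; exact Int.natCast_dvd_natCast
    have heq : (k : Int) = (1 + (t : Int)) * (1 + (t : Int)) ↔ k = (t + 1) * (t + 1) := by
      rw [hcast]
      constructor <;> intro h <;> exact_mod_cast h
    by_cases h1 : (t + 1) * (t + 1) ≤ k ∧ (t + 1) ∣ k
    · rw [if_pos (by rw [hle, hdv]; exact h1), if_pos h1]
      by_cases h2 : k = (t + 1) * (t + 1)
      · rw [if_pos (heq.mpr h2), if_pos h2]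
        norm_num
      · rw [if_neg (fun hc => h2 (heq.mp hc)), if_neg h2]
        norm_num
    · rw [if_neg (by rw [hle, hdv]; exact h1), if_neg h1]
      norm_num
  have hm : Nat.sqrt k ≤ Nat.sqrt e.toNat := Nat.sqrt_le_sqrt (by omega)
  calc ∑ t ∈ Finset.range (Nat.sqrt e.toNat),
        (if (1 + (t : Int)) * (1 + (t : Int)) ≤ (k : Int) ∧ (1 + (t : Int)) ∣ (k : Int)
          then (if (k : Int) = (1 + (t : Int)) * (1 + (t : Int)) then (1 : Int) else 2) else 0)
      = ((∑ t ∈ Finset.range (Nat.sqrt e.toNat),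
          (if (t + 1) * (t + 1) ≤ k ∧ (t + 1) ∣ k
            then (if k = (t + 1) * (t + 1) then 1 else 2) else 0) : Nat) : Int) := by
        push_cast [← hterm]
        rfl
    _ = ((∑ t ∈ Finset.range k, (if (t + 1) ∣ k then 1 else 0) : Nat) : Int) := by
        rw [pairing k (Nat.sqrt e.toNat) hk1 hm]
    _ = ∑ t ∈ Finset.range k, (if (1 + (t : Int)) ∣ (k : Int) then (1 : Int) else 0) := by
        push_cast
        apply Finset.sum_congr rfl
        intro t _
        have hiff : ((t : Int) + 1) ∣ (k : Int) ↔ (t + 1) ∣ k := by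
          exact_mod_cast Int.natCast_dvd_natCast (m := t + 1) (n := k)
        rw [show (1 + (t : Int)) = ((t : Int) + 1) from by ring, if_congr hiff rfl rfl]

-- A's outer sieve loop preserves the list length.
theorem foldOuter_length (e : Int) (L : List Int) (dc : List Int) :
    (L.foldl
      (fun dc i =>
        (PySem.List.pyRange i (e + 1) i).foldl
          (fun dc j => PySem.List.pySetD dc j (PySem.List.pyGetD dc j 0 + 1)) dc)
      dc).length = dc.length := by
  induction L generalizing dc with
  | nil => rfl
  | cons i L ih => rw [List.foldl_cons, ih, foldIncr_length]
-- The two Step-1 arrays are equal.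
theorem counts_eq (e : Int) : sieveCounts e = pairCounts e := by
  have hs : (sieveCounts e).length = (e + 1).toNat := by
    unfold sieveCounts; rw [foldOuter_length, List.length_replicate]
  have ht : (pairCounts e).length = (e + 1).toNat := by
    unfold pairCounts
    rw [pairSieve_length (e + 1 - 1).toNat e 1 _ rfl, List.length_replicate]
  apply List.ext_getElem (by rw [hs, ht])
  intro k hk1 hk2
  have hkN : k < (e + 1).toNat := by omega
  have e1 : (sieveCounts e)[k] = PySem.List.pyGetD (sieveCounts e) (k : Int) 0 := by
    rw [PySem.List.pyGetD_natCast, List.getD_eq_getElem _ _ hk1]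
  have e2 : (pairCounts e)[k] = PySem.List.pyGetD (pairCounts e) (k : Int) 0 := by
    rw [PySem.List.pyGetD_natCast, List.getD_eq_getElem _ _ hk2]
  rw [e1, e2, sieve_get e k hkN, pair_get e k hkN]
  rcases Nat.eq_zero_or_pos k with hk0 | hk1'
  · subst hk0
    rw [show ((0 : Nat) : Int) + 1 = 1 from by norm_num, PySem.List.pyRange_one_eq_nil le_rfl]
    simp only [List.map_nil, List.sum_nil]
    apply (List.sum_eq_zero _).symm
    intro x hx
    obtain ⟨d, hd, rfl⟩ := List.mem_map.mp hx
    have hd1 : 1 ≤ d := ((PySem.List.mem_pyRange_one).mp hd).1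
    rw [if_neg]
    rintro ⟨hdd, -⟩
    have : (1 : Int) ≤ d * d := by nlinarith
    simp only [Nat.cast_zero] at hdd
    omega
  · rw [(pair_eq_sum e k hk1' (by omega)).symm]

-- ===== VERDICT (by name: the statement is the Claim_ definition above) =====
theorem solution_spec : Claim_equal_solution := by
  intro e starts _ _
  unfold Spec_solution solution solution_alt
  rw [counts_eq]
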